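-- pv_equiv track=rewrite | github.com/cl-ei/Gobang-Games | calcul/core.py | get_chess_type
-- ===== SOURCE A (Python) =====
-- def get_chess_type(table=[],pos = (0,0),key = 1):
--     x,y = pos
--     chess_type = ['' for i in range(8)]
--
--     #判断 8个方向上的棋子数
--     for i in range(1,5):
--         if (x-i) < 0:
--             break
--         elif table[x-i][y] == key :
--             chess_type[0] = chess_type[0] + 'a'
--         elif table[x-i][y] == 0 :
--             chess_type[0] = chess_type[0] + '?'
--         else:
--             break
--
--     for i in range(1,5):
--         if (x-i) < 0 or  (y-i) < 0:
--             break
--         elif table[x-i][y-i] == key :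
--             chess_type[1] = chess_type[1] + 'a'
--         elif table[x-i][y-i] == 0 :
--             chess_type[1] = chess_type[1] + '?'
--         else:
--             break
--
--     for i in range(1,5):
--         if (y-i) < 0 :
--             break
--         elif table[x][y-i] == key :
--             chess_type[2] = chess_type[2] + 'a'
--         elif table[x][y-i] == 0 :
--             chess_type[2] = chess_type[2] + '?'
--         else:
--             break
--
--     for i in range(1,5):
--         if (x+i)>14 or (y-i) < 0 :
--             break
--         elif table[x+i][y-i] == key :
--             chess_type[3] = chess_type[3] + 'a'
--         elif table[x+i][y-i]  == 0 :
--             chess_type[3] = chess_type[3] + '?'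
--         else:
--             break
--     # 后4个方向
--
--     for i in range(1,5):
--         if (x+i)>14:
--             break
--         elif table[x+i][y] == key :
--             chess_type[4] = chess_type[4] + 'a'
--         elif table[x+i][y] == 0 :
--             chess_type[4] = chess_type[4] + '?'
--         else:
--             break
--
--     for i in range(1,5):
--         if (x+i)>14 or (y+i)>14:
--             break
--         elif table[x+i][y+i] == key:
--             chess_type[5] = chess_type[5] + 'a'
--         elif table[x+i][y+i] == 0:
--             chess_type[5] = chess_type[5] + '?'
--         else:
--             break
--
--     for i in range(1,5):
--         if (y+i)>14:
--             break
--         elif table[x][y+i] == key: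
--             chess_type[6] = chess_type[6] + 'a'
--         elif table[x][y+i] == 0:
--             chess_type[6] = chess_type[6] + '?'
--         else:
--             break
--     for i in range(1,5):
--         if (x-i)<0 or (y+i)>14:
--             break
--         elif table[x-i][y+i] == key:
--             chess_type[7] = chess_type[7] + 'a'
--         elif table[x-i][y+i] == 0:
--             chess_type[7] = chess_type[7] + '?'
--         else:
--             break
--     #--------------------------------------#
--     chess_type_4_dir = ['' for i in range(4)]
--
--     for i in range(4):
--         chess_type_4_dir[i] = chess_type[i][::-1] + 'a' + chess_type[i+4]
--     return chess_type_4_dir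
-- ===== SOURCE B (Python) =====
-- def get_chess_type(table=[], pos=(0, 0), key=1):
--     x, y = pos
--
--     def reach(c, d):
--         # closed-form number of steps the moving coordinate may take before
--         # leaving the board along delta d (4 = no constraint for d == 0)
--         if d < 0:
--             return c
--         if d > 0:
--             return 14 - c
--         return 4
--
--     def scan(nx, ny, dx, dy, budget):
--         # purely value-driven recursive scan: the board bounds were already
--         # folded into the step budget, so only cell values decide
--         if budget <= 0:
--             return ''
--         v = table[nx][ny]
--         if v == key:
--             return 'a' + scan(nx + dx, ny + dy, dx, dy, budget - 1)
--         if v == 0: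
--             return '?' + scan(nx + dx, ny + dy, dx, dy, budget - 1)
--         return ''
--
--     def ray(dx, dy):
--         return scan(x + dx, y + dy, dx, dy, min(4, reach(x, dx), reach(y, dy)))
--
--     return [ray(dx, dy)[::-1] + 'a' + ray(-dx, -dy)
--             for (dx, dy) in ((-1, 0), (-1, -1), (0, -1), (1, -1))]
-- ===== Notes on version B (the rewrite author's own statement) =====
-- stated objective: simpler
-- what changed: Instead of eight copy-pasted loops that test board bounds at every step, B computes each ray's step budget once in closed form (min of 4 and the distance of each moving coordinate to its board edge) and then runs a purely value-driven recursive scan that builds the pattern string by prepending, over a 4-entry direction table with the opposite ray as the negated vector.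
import Mathlib
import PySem

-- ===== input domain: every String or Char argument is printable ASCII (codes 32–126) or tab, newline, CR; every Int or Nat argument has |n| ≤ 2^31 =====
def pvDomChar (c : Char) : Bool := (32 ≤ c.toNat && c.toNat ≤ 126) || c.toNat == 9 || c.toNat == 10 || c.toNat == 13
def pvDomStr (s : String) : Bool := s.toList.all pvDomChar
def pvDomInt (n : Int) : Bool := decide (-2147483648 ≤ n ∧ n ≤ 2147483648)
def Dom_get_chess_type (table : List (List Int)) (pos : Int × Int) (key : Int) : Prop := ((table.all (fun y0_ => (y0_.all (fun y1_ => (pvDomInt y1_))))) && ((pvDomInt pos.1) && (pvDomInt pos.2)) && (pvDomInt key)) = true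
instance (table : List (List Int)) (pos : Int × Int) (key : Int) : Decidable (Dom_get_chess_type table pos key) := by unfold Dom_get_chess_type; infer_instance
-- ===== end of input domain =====

-- B replaces A's eight copy-pasted bound-checking loops by a closed-form per-ray step budget
-- plus a purely value-driven recursive scan over a direction table (objective: simpler);
-- same return value wherever A returns.


-- table[nx][ny]: chained Python indexing, incl. negative-index wraparound (none = IndexError)
def pvAt (table : List (List Int)) (nx ny : Int) : Option Int :=
  match PySem.List.pyGet? table nx with
  | none => none
  | some row => PySem.List.pyGet? row ny

-- ===== PORT A =====
-- Strings are built as their char lists (s + 'a' → s ++ ['a'], s[::-1] → s.reverse) and packed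
-- with String.ofList at the end; an out-of-range access (IndexError in Python, excluded by Pre_)
-- ends the loop. One helper per Python loop, same checks in the same order.
def aloop0 (table : List (List Int)) (x y key : Int) (l : List Int) (s : List Char) : List Char :=
  match l with
  | [] => s
  | i :: rest =>
    if x - i < 0 then s
    else match pvAt table (x - i) y with
      | some v =>
        if v = key then aloop0 table x y key rest (s ++ ['a'])
        else if v = 0 then aloop0 table x y key rest (s ++ ['?'])
        else s
      | none => s

def aloop1 (table : List (List Int)) (x y key : Int) (l : List Int) (s : List Char) : List Char :=
  match l with
  | [] => s
  | i :: rest =>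
    if x - i < 0 ∨ y - i < 0 then s
    else match pvAt table (x - i) (y - i) with
      | some v =>
        if v = key then aloop1 table x y key rest (s ++ ['a'])
        else if v = 0 then aloop1 table x y key rest (s ++ ['?'])
        else s
      | none => s

def aloop2 (table : List (List Int)) (x y key : Int) (l : List Int) (s : List Char) : List Char :=
  match l with
  | [] => s
  | i :: rest =>
    if y - i < 0 then s
    else match pvAt table x (y - i) with
      | some v =>
        if v = key then aloop2 table x y key rest (s ++ ['a'])
        else if v = 0 then aloop2 table x y key rest (s ++ ['?'])
        else s
      | none => s

def aloop3 (table : List (List Int)) (x y key : Int) (l : List Int) (s : List Char) : List Char :=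
  match l with
  | [] => s
  | i :: rest =>
    if x + i > 14 ∨ y - i < 0 then s
    else match pvAt table (x + i) (y - i) with
      | some v =>
        if v = key then aloop3 table x y key rest (s ++ ['a'])
        else if v = 0 then aloop3 table x y key rest (s ++ ['?'])
        else s
      | none => s

def aloop4 (table : List (List Int)) (x y key : Int) (l : List Int) (s : List Char) : List Char :=
  match l with
  | [] => s
  | i :: rest =>
    if x + i > 14 then s
    else match pvAt table (x + i) y with
      | some v =>
        if v = key then aloop4 table x y key rest (s ++ ['a'])
        else if v = 0 then aloop4 table x y key rest (s ++ ['?'])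
        else s
      | none => s

def aloop5 (table : List (List Int)) (x y key : Int) (l : List Int) (s : List Char) : List Char :=
  match l with
  | [] => s
  | i :: rest =>
    if x + i > 14 ∨ y + i > 14 then s
    else match pvAt table (x + i) (y + i) with
      | some v =>
        if v = key then aloop5 table x y key rest (s ++ ['a'])
        else if v = 0 then aloop5 table x y key rest (s ++ ['?'])
        else s
      | none => s

def aloop6 (table : List (List Int)) (x y key : Int) (l : List Int) (s : List Char) : List Char :=
  match l with
  | [] => s
  | i :: rest =>
    if y + i > 14 then s
    else match pvAt table x (y + i) with
      | some v =>
        if v = key then aloop6 table x y key rest (s ++ ['a'])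
        else if v = 0 then aloop6 table x y key rest (s ++ ['?'])
        else s
      | none => s

def aloop7 (table : List (List Int)) (x y key : Int) (l : List Int) (s : List Char) : List Char :=
  match l with
  | [] => s
  | i :: rest =>
    if x - i < 0 ∨ y + i > 14 then s
    else match pvAt table (x - i) (y + i) with
      | some v =>
        if v = key then aloop7 table x y key rest (s ++ ['a'])
        else if v = 0 then aloop7 table x y key rest (s ++ ['?'])
        else s
      | none => s

def get_chess_type (table : List (List Int)) (pos : Int × Int) (key : Int) : List String :=
  [String.ofList ((aloop0 table pos.1 pos.2 key [1, 2, 3, 4] []).reverse ++ 'a' :: aloop4 table pos.1 pos.2 key [1, 2, 3, 4] []),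
   String.ofList ((aloop1 table pos.1 pos.2 key [1, 2, 3, 4] []).reverse ++ 'a' :: aloop5 table pos.1 pos.2 key [1, 2, 3, 4] []),
   String.ofList ((aloop2 table pos.1 pos.2 key [1, 2, 3, 4] []).reverse ++ 'a' :: aloop6 table pos.1 pos.2 key [1, 2, 3, 4] []),
   String.ofList ((aloop3 table pos.1 pos.2 key [1, 2, 3, 4] []).reverse ++ 'a' :: aloop7 table pos.1 pos.2 key [1, 2, 3, 4] [])]

-- ===== PORT B =====
-- closed-form step budget: how far the moving coordinate may go before leaving the board
def reach (c d : Int) : Int := if d < 0 then c else if d > 0 then 14 - c else 4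

-- purely value-driven recursive scan, string built by prepending; an out-of-range access
-- (IndexError in Python, excluded by Pre_) ends the scan
def bscan (table : List (List Int)) (key dx dy : Int) (nx ny budget : Int) : List Char :=
  if budget ≤ 0 then []
  else match pvAt table nx ny with
    | none => []
    | some v =>
      if v = key then 'a' :: bscan table key dx dy (nx + dx) (ny + dy) (budget - 1)
      else if v = 0 then '?' :: bscan table key dx dy (nx + dx) (ny + dy) (budget - 1)
      else []
termination_by budget.toNat
decreasing_by all_goals omega

def get_chess_type_alt (table : List (List Int)) (pos : Int × Int) (key : Int) : List String :=
  ([((-1 : Int), (0 : Int)), (-1, -1), (0, -1), (1, -1)]).map (fun d =>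
    String.ofList
      ((bscan table key d.1 d.2 (pos.1 + d.1) (pos.2 + d.2)
          (min (min 4 (reach pos.1 d.1)) (reach pos.2 d.2))).reverse
        ++ 'a' :: bscan table key (-d.1) (-d.2) (pos.1 + -d.1) (pos.2 + -d.2)
          (min (min 4 (reach pos.1 (-d.1))) (reach pos.2 (-d.2)))))

-- ===== PRECONDITION & SPEC =====
-- cell value continues A's scan (empty square or own stone)
abbrev pvCont (o : Option Int) (key : Int) : Prop := o = some 0 ∨ o = some key
-- A's bound check for one coordinate of a ray step: only the moving side of the board bounds
abbrev pvChk (p dlt i : Int) : Prop := (dlt < 0 → 0 ≤ p + i * dlt) ∧ (0 < dlt → p + i * dlt ≤ 14)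
-- along the ray (dx,dy): every step A reaches (its bound check passes and every earlier probed
-- cell continued the scan) probes an existing cell — A's scan of this ray raises no IndexError
def pvSafe (table : List (List Int)) (key x y dx dy : Int) : Prop :=
  ∀ i ∈ ([1, 2, 3, 4] : List Int), pvChk x dx i ∧ pvChk y dy i →
    (∀ j ∈ ([1, 2, 3, 4] : List Int), j < i → pvCont (pvAt table (x + j * dx) (y + j * dy)) key) →
    pvAt table (x + i * dx) (y + i * dy) ≠ none

-- Pre_ holds exactly when Python's A returns normally: along each of the 8 rays, every cell A's
-- scan reaches exists (no IndexError); nothing else is excluded.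
def Pre_get_chess_type (table : List (List Int)) (pos : Int × Int) (key : Int) : Prop :=
  ∀ dx ∈ ([-1, 0, 1] : List Int), ∀ dy ∈ ([-1, 0, 1] : List Int),
    ¬ (dx = 0 ∧ dy = 0) → pvSafe table key pos.1 pos.2 dx dy
set_option maxHeartbeats 2000000 in
instance (table : List (List Int)) (pos : Int × Int) (key : Int) : Decidable (Pre_get_chess_type table pos key) := by
  unfold Pre_get_chess_type pvSafe pvChk pvCont; infer_instance

def pvWitness_get_chess_type : List (List Int) × (Int × Int) × Int :=
  (List.replicate 15 (List.replicate 15 0), ((7 : Int), (7 : Int)), (1 : Int))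

def Spec_get_chess_type (table : List (List Int)) (pos : Int × Int) (key : Int) (out : List String) : Prop := out = get_chess_type_alt table pos key
instance (table : List (List Int)) (pos : Int × Int) (key : Int) (out : List String) : Decidable (Spec_get_chess_type table pos key out) := by unfold Spec_get_chess_type; infer_instance

-- ===== CLAIM (what is proved, stated in full; the proofs are below) =====
def Claim_equal_get_chess_type : Prop := ∀ (table : List (List Int)) (pos : Int × Int) (key : Int), Dom_get_chess_type table pos key → Pre_get_chess_type table pos key → Spec_get_chess_type table pos key (get_chess_type table pos key)

-- ===== LEMMAS AND PROOFS =====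

-- common shape of A's eight ray loops (break check `cond`, probed cell `cell`)
def agen (table : List (List Int)) (key : Int) (cond : Int → Prop) [DecidablePred cond]
    (cell : Int → Int × Int) (l : List Int) (s : List Char) : List Char :=
  match l with
  | [] => s
  | i :: rest =>
    if cond i then
      match pvAt table (cell i).1 (cell i).2 with
      | some v =>
        if v = key then agen table key cond cell rest (s ++ ['a'])
        else if v = 0 then agen table key cond cell rest (s ++ ['?'])
        else s
      | none => s
    else s

theorem agen_congr_mem (table : List (List Int)) (key : Int) (c1 c2 : Int → Prop)
    [DecidablePred c1] [DecidablePred c2] (cell : Int → Int × Int) :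
    ∀ (l : List Int), (∀ i ∈ l, c1 i ↔ c2 i) → ∀ (s : List Char),
      agen table key c1 cell l s = agen table key c2 cell l s := by
  intro l
  induction l with
  | nil => intro _ s; rfl
  | cons i rest ih =>
    intro h s
    have hi := h i (List.mem_cons_self)
    have hrest : ∀ j ∈ rest, c1 j ↔ c2 j := fun j hj => h j (List.mem_cons_of_mem _ hj)
    simp only [agen]
    by_cases hc : c1 i
    · rw [if_pos hc, if_pos (hi.mp hc)]
      cases pvAt table (cell i).1 (cell i).2 with
      | none => rfl
      | some v => simp only; split_ifs <;> first | rfl | exact ih hrest _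
    · rw [if_neg hc, if_neg (fun hx => hc (hi.mpr hx))]

-- consecutive step indices j, j+1, …, j+m-1
def stepsFrom (j : Int) (m : Nat) : List Int :=
  match m with
  | 0 => []
  | m + 1 => j :: stepsFrom (j + 1) m

-- A's generic loop with a monotone cut-off `i ≤ N` equals B's budgeted recursive scan
theorem agen_eq_bscan (table : List (List Int)) (key x y dx dy N : Int) :
    ∀ (m : Nat) (j : Int) (s : List Char),
      agen table key (fun i => i ≤ N) (fun i => (x + i * dx, y + i * dy)) (stepsFrom j m) s
        = s ++ bscan table key dx dy (x + j * dx) (y + j * dy) (min (N - j + 1) (m : Int)) := by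
  intro m
  induction m with
  | zero =>
    intro j s
    have : min (N - j + 1) ((0 : Nat) : Int) ≤ 0 := by omega
    rw [stepsFrom, agen, bscan, if_pos this, List.append_nil]
  | succ m ih =>
    intro j s
    rw [stepsFrom]
    simp only [agen]
    by_cases hc : j ≤ N
    · rw [if_pos hc]
      have hb : ¬ (min (N - j + 1) ((m + 1 : Nat) : Int) ≤ 0) := by push_cast; omega
      rw [bscan, if_neg hb]
      cases hv : pvAt table (x + j * dx) (y + j * dy) with
      | none => simp [List.append_nil]
      | some v =>
        simp only
        have hbud : min (N - j + 1) ((m + 1 : Nat) : Int) - 1 = min (N - (j + 1) + 1) (m : Int) := by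
          push_cast; omega
        have hcoord1 : x + j * dx + dx = x + (j + 1) * dx := by ring
        have hcoord2 : y + j * dy + dy = y + (j + 1) * dy := by ring
        split_ifs with h1 h2
        · rw [ih (j + 1) (s ++ ['a']), hbud, hcoord1, hcoord2]
          simp
        · rw [ih (j + 1) (s ++ ['?']), hbud, hcoord1, hcoord2]
          simp
        · simp [List.append_nil]
    · rw [if_neg hc]
      have hb : min (N - j + 1) ((m + 1 : Nat) : Int) ≤ 0 := by push_cast; omega
      rw [bscan, if_pos hb, List.append_nil]

-- [1,2,3,4] as consecutive steps
theorem steps14 : stepsFrom 1 4 = ([1, 2, 3, 4] : List Int) := by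
  simp [stepsFrom]

-- A's per-step bound checks are exactly the cut-off at the closed-form budget, on steps 1..4
theorem chk_iff_le (p q dp dq i : Int) (_h1 : 1 ≤ i) (h4 : i ≤ 4)
    (hdp : dp = -1 ∨ dp = 0 ∨ dp = 1) (hdq : dq = -1 ∨ dq = 0 ∨ dq = 1) :
    (pvChk p dp i ∧ pvChk q dq i) ↔ i ≤ min (min 4 (reach p dp)) (reach q dq) := by
  unfold pvChk reach
  rcases hdp with h | h | h <;> rcases hdq with h' | h' | h' <;> subst h <;> subst h' <;>
    constructor <;> intro hh <;> [skip; skip; skip; skip; skip; skip; skip; skip; skip;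
      skip; skip; skip; skip; skip; skip; skip; skip; skip] <;>
    simp_all <;> omega

-- one ray: A's concrete loop body (already in agen form with the pvChk condition) equals B's scan
theorem ray_eq (table : List (List Int)) (key x y dx dy : Int)
    (hdx : dx = -1 ∨ dx = 0 ∨ dx = 1) (hdy : dy = -1 ∨ dy = 0 ∨ dy = 1) :
    agen table key (fun i => pvChk x dx i ∧ pvChk y dy i)
        (fun i => (x + i * dx, y + i * dy)) ([1, 2, 3, 4] : List Int) []
      = bscan table key dx dy (x + dx) (y + dy)
          (min (min 4 (reach x dx)) (reach y dy)) := by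
  set N := min (min 4 (reach x dx)) (reach y dy) with hN
  have hcong := agen_congr_mem table key
      (fun i => pvChk x dx i ∧ pvChk y dy i) (fun i => i ≤ N)
      (fun i => (x + i * dx, y + i * dy)) ([1, 2, 3, 4] : List Int)
      (by
        intro i hi
        have : i = 1 ∨ i = 2 ∨ i = 3 ∨ i = 4 := by simpa using hi
        have h1 : 1 ≤ i := by omega
        have h4 : i ≤ 4 := by omega
        exact chk_iff_le x y dx dy i h1 h4 hdx hdy) []
  rw [hcong, ← steps14, agen_eq_bscan]
  have hNle : N ≤ 4 := by rw [hN]; omega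
  have hmin : min (N - 1 + 1) ((4 : Nat) : Int) = N := by push_cast; omega
  have e1 : x + 1 * dx = x + dx := by ring
  have e2 : y + 1 * dy = y + dy := by ring
  rw [hmin, e1, e2, List.nil_append]

theorem aloop0_eq (table : List (List Int)) (x y key : Int) : ∀ (l : List Int) (s : List Char),
    aloop0 table x y key l s
      = agen table key (fun i => pvChk x (-1) i ∧ pvChk y 0 i) (fun i => (x + i * (-1), y + i * 0)) l s := by
  intro l
  induction l with
  | nil => intro s; rfl
  | cons i rest ih =>
    intro s
    have e1 : x + i * (-1) = x - i := by ring
    have e2 : y + i * 0 = y := by ring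
    simp only [aloop0, agen, pvChk, e1, e2]
    by_cases hc : x - i < 0
    · rw [if_pos hc, if_neg (by omega)]
    · rw [if_neg hc, if_pos (by omega)]
      cases pvAt table (x - i) (y) with
      | none => rfl
      | some v => simp only; split_ifs <;> first | rfl | exact ih _

theorem aloop1_eq (table : List (List Int)) (x y key : Int) : ∀ (l : List Int) (s : List Char),
    aloop1 table x y key l s
      = agen table key (fun i => pvChk x (-1) i ∧ pvChk y (-1) i) (fun i => (x + i * (-1), y + i * (-1))) l s := by
  intro l
  induction l with
  | nil => intro s; rfl
  | cons i rest ih =>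
    intro s
    have e1 : x + i * (-1) = x - i := by ring
    have e2 : y + i * (-1) = y - i := by ring
    simp only [aloop1, agen, pvChk, e1, e2]
    by_cases hc : x - i < 0 ∨ y - i < 0
    · rw [if_pos hc, if_neg (by omega)]
    · rw [if_neg hc, if_pos (by omega)]
      cases pvAt table (x - i) (y - i) with
      | none => rfl
      | some v => simp only; split_ifs <;> first | rfl | exact ih _

theorem aloop2_eq (table : List (List Int)) (x y key : Int) : ∀ (l : List Int) (s : List Char),
    aloop2 table x y key l s
      = agen table key (fun i => pvChk x 0 i ∧ pvChk y (-1) i) (fun i => (x + i * 0, y + i * (-1))) l s := by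
  intro l
  induction l with
  | nil => intro s; rfl
  | cons i rest ih =>
    intro s
    have e1 : x + i * 0 = x := by ring
    have e2 : y + i * (-1) = y - i := by ring
    simp only [aloop2, agen, pvChk, e1, e2]
    by_cases hc : y - i < 0
    · rw [if_pos hc, if_neg (by omega)]
    · rw [if_neg hc, if_pos (by omega)]
      cases pvAt table (x) (y - i) with
      | none => rfl
      | some v => simp only; split_ifs <;> first | rfl | exact ih _

theorem aloop3_eq (table : List (List Int)) (x y key : Int) : ∀ (l : List Int) (s : List Char),
    aloop3 table x y key l s
      = agen table key (fun i => pvChk x 1 i ∧ pvChk y (-1) i) (fun i => (x + i * 1, y + i * (-1))) l s := by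
  intro l
  induction l with
  | nil => intro s; rfl
  | cons i rest ih =>
    intro s
    have e1 : x + i * 1 = x + i := by ring
    have e2 : y + i * (-1) = y - i := by ring
    simp only [aloop3, agen, pvChk, e1, e2]
    by_cases hc : x + i > 14 ∨ y - i < 0
    · rw [if_pos hc, if_neg (by omega)]
    · rw [if_neg hc, if_pos (by omega)]
      cases pvAt table (x + i) (y - i) with
      | none => rfl
      | some v => simp only; split_ifs <;> first | rfl | exact ih _

theorem aloop4_eq (table : List (List Int)) (x y key : Int) : ∀ (l : List Int) (s : List Char),
    aloop4 table x y key l s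
      = agen table key (fun i => pvChk x 1 i ∧ pvChk y 0 i) (fun i => (x + i * 1, y + i * 0)) l s := by
  intro l
  induction l with
  | nil => intro s; rfl
  | cons i rest ih =>
    intro s
    have e1 : x + i * 1 = x + i := by ring
    have e2 : y + i * 0 = y := by ring
    simp only [aloop4, agen, pvChk, e1, e2]
    by_cases hc : x + i > 14
    · rw [if_pos hc, if_neg (by omega)]
    · rw [if_neg hc, if_pos (by omega)]
      cases pvAt table (x + i) (y) with
      | none => rfl
      | some v => simp only; split_ifs <;> first | rfl | exact ih _

theorem aloop5_eq (table : List (List Int)) (x y key : Int) : ∀ (l : List Int) (s : List Char),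
    aloop5 table x y key l s
      = agen table key (fun i => pvChk x 1 i ∧ pvChk y 1 i) (fun i => (x + i * 1, y + i * 1)) l s := by
  intro l
  induction l with
  | nil => intro s; rfl
  | cons i rest ih =>
    intro s
    have e1 : x + i * 1 = x + i := by ring
    have e2 : y + i * 1 = y + i := by ring
    simp only [aloop5, agen, pvChk, e1, e2]
    by_cases hc : x + i > 14 ∨ y + i > 14
    · rw [if_pos hc, if_neg (by omega)]
    · rw [if_neg hc, if_pos (by omega)]
      cases pvAt table (x + i) (y + i) with
      | none => rfl
      | some v => simp only; split_ifs <;> first | rfl | exact ih _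

theorem aloop6_eq (table : List (List Int)) (x y key : Int) : ∀ (l : List Int) (s : List Char),
    aloop6 table x y key l s
      = agen table key (fun i => pvChk x 0 i ∧ pvChk y 1 i) (fun i => (x + i * 0, y + i * 1)) l s := by
  intro l
  induction l with
  | nil => intro s; rfl
  | cons i rest ih =>
    intro s
    have e1 : x + i * 0 = x := by ring
    have e2 : y + i * 1 = y + i := by ring
    simp only [aloop6, agen, pvChk, e1, e2]
    by_cases hc : y + i > 14
    · rw [if_pos hc, if_neg (by omega)]
    · rw [if_neg hc, if_pos (by omega)]
      cases pvAt table (x) (y + i) with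
      | none => rfl
      | some v => simp only; split_ifs <;> first | rfl | exact ih _

theorem aloop7_eq (table : List (List Int)) (x y key : Int) : ∀ (l : List Int) (s : List Char),
    aloop7 table x y key l s
      = agen table key (fun i => pvChk x (-1) i ∧ pvChk y 1 i) (fun i => (x + i * (-1), y + i * 1)) l s := by
  intro l
  induction l with
  | nil => intro s; rfl
  | cons i rest ih =>
    intro s
    have e1 : x + i * (-1) = x - i := by ring
    have e2 : y + i * 1 = y + i := by ring
    simp only [aloop7, agen, pvChk, e1, e2]
    by_cases hc : x - i < 0 ∨ y + i > 14
    · rw [if_pos hc, if_neg (by omega)]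
    · rw [if_neg hc, if_pos (by omega)]
      cases pvAt table (x - i) (y + i) with
      | none => rfl
      | some v => simp only; split_ifs <;> first | rfl | exact ih _

-- ===== VERDICT (by name: the statement is the Claim_ definition above) =====
theorem get_chess_type_spec : Claim_equal_get_chess_type := by
  intro table pos key _ _
  unfold Spec_get_chess_type get_chess_type get_chess_type_alt
  simp only [List.map_cons, List.map_nil]
  norm_num
  rw [aloop0_eq, aloop1_eq, aloop2_eq, aloop3_eq, aloop4_eq, aloop5_eq, aloop6_eq, aloop7_eq]
  rw [ray_eq table key pos.1 pos.2 (-1) 0 (by norm_num) (by norm_num),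
      ray_eq table key pos.1 pos.2 (-1) (-1) (by norm_num) (by norm_num),
      ray_eq table key pos.1 pos.2 0 (-1) (by norm_num) (by norm_num),
      ray_eq table key pos.1 pos.2 1 (-1) (by norm_num) (by norm_num),
      ray_eq table key pos.1 pos.2 1 0 (by norm_num) (by norm_num),
      ray_eq table key pos.1 pos.2 1 1 (by norm_num) (by norm_num),
      ray_eq table key pos.1 pos.2 0 1 (by norm_num) (by norm_num),
      ray_eq table key pos.1 pos.2 (-1) 1 (by norm_num) (by norm_num)]
  norm_num
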